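-- pv_equiv track=rewrite | github.com/UZUB18/Catan_analyser | catan_analyzer/analysis/simulation.py | _split_iterations
-- ===== SOURCE A (Python) =====
-- def _split_iterations(total_iterations: int, worker_count: int) -> list[int]:
--     workers = max(1, worker_count)
--     base = total_iterations // workers
--     remainder = total_iterations % workers
--     chunks = [
--         base + (1 if worker_index < remainder else 0)
--         for worker_index in range(workers)
--     ]
--     return [chunk for chunk in chunks if chunk > 0]
-- ===== SOURCE B (Python) =====
-- def _split_iterations(total_iterations: int, worker_count: int) -> list[int]:
--     out = []
--     remaining = total_iterations
--     for w in range(max(1, worker_count), 0, -1):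
--         chunk = -((-remaining) // w)  # ceiling of the fair share for the next worker
--         if chunk > 0:
--             out.append(chunk)
--         remaining -= chunk
--     return out
-- ===== Notes on version B (the rewrite author's own statement) =====
-- stated objective: alternative
-- what changed: Instead of computing base/remainder once and filtering a comprehension, B peels chunks one at a time: it repeatedly takes the ceiling of the fair share of the remaining iterations over the remaining workers, appending positive chunks as it goes.
import Mathlib
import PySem

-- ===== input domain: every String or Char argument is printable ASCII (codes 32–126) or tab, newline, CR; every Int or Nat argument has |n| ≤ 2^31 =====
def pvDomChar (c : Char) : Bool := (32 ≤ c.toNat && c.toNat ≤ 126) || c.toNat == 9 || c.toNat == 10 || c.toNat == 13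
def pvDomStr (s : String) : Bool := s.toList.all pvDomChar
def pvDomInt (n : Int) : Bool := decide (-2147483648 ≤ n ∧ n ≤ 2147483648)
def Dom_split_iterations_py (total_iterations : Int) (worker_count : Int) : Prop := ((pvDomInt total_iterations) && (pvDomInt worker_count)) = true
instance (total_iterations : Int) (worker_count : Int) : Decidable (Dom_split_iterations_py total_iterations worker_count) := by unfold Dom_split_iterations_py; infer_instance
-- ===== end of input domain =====

-- B peels chunks one at a time (ceiling of the remaining fair share per remaining worker)
-- instead of A's closed-form base/remainder comprehension plus filter (objective: alternative).

-- ===== PORT A =====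
def split_iterations_py (total_iterations : Int) (worker_count : Int) : List Int :=
  let workers := max 1 worker_count
  let base := PySem.Int.floordiv total_iterations workers
  let remainder := PySem.Int.mod total_iterations workers
  let chunks := (PySem.List.pyRange 0 workers 1).map
    (fun worker_index => base + (if worker_index < remainder then (1 : Int) else 0))
  chunks.filter (fun chunk => 0 < chunk)

-- ===== PORT B =====
-- B's loop 'for w in range(max(1, worker_count), 0, -1)' counts the remaining workers down;
-- ported as structural recursion on that count (fuel = the Nat value of w).
-- 'out.append(chunk)' is carried as a reversed accumulator (tail recursion), reversed at the end.
def pvPeel (remaining : Int) (out : List Int) : Nat → List Int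
  | 0 => out.reverse
  | Nat.succ n =>
    let w : Int := (n : Int) + 1
    let chunk := -(PySem.Int.floordiv (-remaining) w)
    pvPeel (remaining - chunk) (if 0 < chunk then chunk :: out else out) n

def split_iterations_py_alt (total_iterations : Int) (worker_count : Int) : List Int :=
  pvPeel total_iterations [] (max 1 worker_count).toNat

-- ===== PRECONDITION & SPEC =====
def Spec_split_iterations_py (total_iterations : Int) (worker_count : Int) (out : List Int) : Prop := out = split_iterations_py_alt total_iterations worker_count
instance (total_iterations : Int) (worker_count : Int) (out : List Int) : Decidable (Spec_split_iterations_py total_iterations worker_count out) := by unfold Spec_split_iterations_py; infer_instance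

-- ===== CLAIM (what is proved, stated in full; the proofs are below) =====
def Claim_equal_split_iterations_py : Prop := ∀ (total_iterations : Int) (worker_count : Int), Dom_split_iterations_py total_iterations worker_count → Spec_split_iterations_py total_iterations worker_count (split_iterations_py total_iterations worker_count)

-- ===== LEMMAS AND PROOFS =====

-- A's chunk list in closed form: the first `remainder` workers get base+1, the rest base.
theorem chunks_closed_form (base r w : Int) (h0 : 0 ≤ r) (hrw : r ≤ w) :
    (PySem.List.pyRange 0 w 1).map (fun wi => base + (if wi < r then (1 : Int) else 0))
      = List.replicate r.toNat (base + 1) ++ List.replicate (w - r).toNat base := by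
  apply List.ext_getElem
  · simp [PySem.List.length_pyRange_one]
    omega
  · intro i h1 h2
    have hiw : i < (w - 0).toNat := by
      rw [List.length_map, PySem.List.length_pyRange_one] at h1; exact h1
    rw [List.getElem_map, PySem.List.getElem_pyRange_one]
    by_cases hi : i < r.toNat
    · rw [List.getElem_append_left (by simpa using hi), List.getElem_replicate,
        if_pos (show (0 : Int) + i < r by omega)]
    · rw [List.getElem_append_right (by simpa using hi), List.getElem_replicate,
        if_neg (show ¬ ((0 : Int) + i < r) by omega), add_zero]

-- proof-only helper: the peeling loop without the accumulator
def pvPeelSimple (remaining : Int) : Nat → List Int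
  | 0 => []
  | Nat.succ n =>
    let w : Int := (n : Int) + 1
    let chunk := -(PySem.Int.floordiv (-remaining) w)
    let rest := pvPeelSimple (remaining - chunk) n
    if 0 < chunk then chunk :: rest else rest

-- the tail-recursive port equals the simple recursion
theorem pvPeel_acc (n : Nat) : ∀ (t : Int) (acc : List Int),
    pvPeel t acc n = acc.reverse ++ pvPeelSimple t n := by
  induction n with
  | zero => intro t acc; simp [pvPeel, pvPeelSimple]
  | succ n ih =>
    intro t acc
    rw [pvPeel, pvPeelSimple]
    simp only [ih]
    split_ifs <;> simp

-- B's peeling loop computes exactly the filtered closed form.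
theorem pvPeel_eq (n : Nat) : ∀ (t : Int),
    pvPeelSimple t (n + 1)
      = (List.replicate (PySem.Int.mod t ((n : Int) + 1)).toNat
            (PySem.Int.floordiv t ((n : Int) + 1) + 1)
          ++ List.replicate (((n : Int) + 1) - PySem.Int.mod t ((n : Int) + 1)).toNat
            (PySem.Int.floordiv t ((n : Int) + 1))).filter (fun c => 0 < c) := by
  induction n with
  | zero =>
    intro t
    have hd : PySem.Int.floordiv t 1 = t := by
      rw [PySem.Int.floordiv_eq_iff_of_pos (by norm_num)]; omega
    have hdn : PySem.Int.floordiv (-t) 1 = -t := by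
      rw [PySem.Int.floordiv_eq_iff_of_pos (by norm_num)]; omega
    have hm : PySem.Int.mod t 1 = 0 := by
      have := PySem.Int.floordiv_mul_add_mod t 1
      rw [hd] at this; omega
    simp [pvPeelSimple, List.filter_cons]
  | succ n ih =>
    intro t
    show pvPeelSimple t (n + 1 + 1) = _
    rw [pvPeelSimple]
    push_cast
    set w : Int := (n : Int) + 1 + 1 with hw
    have hwpos : (0 : Int) < w := by positivity
    set b := PySem.Int.floordiv t w with hb
    set r := PySem.Int.mod t w with hr
    have heq : b * w + r = t := PySem.Int.floordiv_mul_add_mod t w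
    have hrnn : 0 ≤ r := PySem.Int.mod_nonneg t hwpos
    have hrlt : r < w := PySem.Int.mod_lt t hwpos
    -- the peeled chunk is the ceiling b + (1 if r > 0 else 0)
    have hchunk : -(PySem.Int.floordiv (-t) w) = b + (if 0 < r then 1 else 0) := by
      rw [PySem.Int.neg_floordiv_neg_eq_iff_of_pos hwpos]
      split_ifs with h <;> constructor <;> nlinarith
    rw [hchunk]
    by_cases hrpos : 0 < r
    · -- remainder > 0: chunk = b+1, rest has base b, remainder r-1 over n+1 workers
      have hdiv' : PySem.Int.floordiv (t - (b + 1)) ((n : Int) + 1) = b := by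
        rw [PySem.Int.floordiv_eq_iff_of_pos (by positivity)]
        constructor <;> nlinarith
      have hmod' : PySem.Int.mod (t - (b + 1)) ((n : Int) + 1) = r - 1 := by
        have := PySem.Int.floordiv_mul_add_mod (t - (b + 1)) ((n : Int) + 1)
        rw [hdiv'] at this; nlinarith
      have h1 : r.toNat = (r - 1).toNat + 1 := by omega
      have h2 : (w - r).toNat = (((n : Int) + 1) - (r - 1)).toNat := by omega
      rw [if_pos hrpos, ih (t - (b + 1)), hdiv', hmod', h1, h2, List.replicate_succ,
        List.cons_append, List.filter_cons]
      by_cases hb1 : 0 < b + 1 <;> simp [hb1]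
    · -- remainder = 0: chunk = b, rest has base b, remainder 0 over n+1 workers
      have hr0 : r = 0 := by omega
      have hdiv' : PySem.Int.floordiv (t - (b + 0)) ((n : Int) + 1) = b := by
        rw [PySem.Int.floordiv_eq_iff_of_pos (by positivity)]
        constructor <;> nlinarith
      have hmod' : PySem.Int.mod (t - (b + 0)) ((n : Int) + 1) = 0 := by
        have := PySem.Int.floordiv_mul_add_mod (t - (b + 0)) ((n : Int) + 1)
        rw [hdiv'] at this; nlinarith
      have h2 : (w - 0 : Int).toNat = ((((n : Int) + 1) - 0).toNat) + 1 := by omega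
      rw [if_neg hrpos, ih (t - (b + 0)), hdiv', hmod', hr0, h2]
      simp only [Int.toNat_zero, List.replicate_zero, List.nil_append, List.replicate_succ,
        List.filter_cons]
      by_cases hbp : 0 < b <;> simp [hbp]

-- ===== VERDICT (by name: the statement is the Claim_ definition above) =====
theorem split_iterations_py_spec : Claim_equal_split_iterations_py := by
  intro t wc _
  unfold Spec_split_iterations_py split_iterations_py split_iterations_py_alt
  set w : Int := max 1 wc with hw
  have hwpos : 0 < w := by simp [hw]
  have hmodnn : 0 ≤ PySem.Int.mod t w := PySem.Int.mod_nonneg t hwpos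
  have hmodlt : PySem.Int.mod t w < w := PySem.Int.mod_lt t hwpos
  simp only []
  rw [chunks_closed_form _ _ _ hmodnn (le_of_lt hmodlt)]
  obtain ⟨n, hn⟩ : ∃ n : Nat, w.toNat = n + 1 := ⟨w.toNat - 1, by omega⟩
  have hwn : ((n : Int) + 1) = w := by omega
  rw [hn, pvPeel_acc, pvPeel_eq, hwn]
  simp
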